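-- pv_equiv track=rewrite | github.com/BBO513/guardian-node | scripts/auth_check.py | check_auth_method
-- ===== SOURCE A (Python) =====
-- AUTH_METHODS = {
--     'PAT': {
--         'name': 'Personal Access Token',
--         'config_keys': ['credential.helper'],
--         'valid_values': ['store', 'manager', 'cache', 'wincred', 'osxkeychain', 'libsecret'],
--         'docs_url': 'https://docs.github.com/en/authentication/keeping-your-account-and-data-secure/creating-a-personal-access-token'
--     },
--     'SSH': {
--         'name': 'SSH Key',
--         'config_keys': ['core.sshCommand', 'url.*.insteadOf'],
--         'docs_url': 'https://docs.github.com/en/authentication/connecting-to-github-with-ssh'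
--     },
--     'PASSKEY': {
--         'name': 'Passkey',
--         'config_keys': ['credential.helper'],
--         'valid_values': ['passkey'],
--         'docs_url': 'https://docs.github.com/en/authentication/authenticating-with-a-passkey'
--     }
-- }
--
-- def check_auth_method(config):
--     """Check if a secure authentication method is configured."""
--     detected_methods = []
--
--     # Check for PAT configuration
--     if any(key.startswith('credential.helper') for key in config.keys()):
--         for key in [k for k in config.keys() if k.startswith('credential.helper')]:
--             value = config[key]
--             if any(v in value for v in AUTH_METHODS['PAT']['valid_values']):
--                 detected_methods.append('PAT')
--                 break
--
--     # Check for SSH configuration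
--     if 'core.sshCommand' in config or any(key.startswith('url.') and key.endswith('.insteadOf') and 'ssh://' in config[key] for key in config.keys()):
--         detected_methods.append('SSH')
--
--     # Check for Passkey configuration
--     if any(key.startswith('credential.helper') and 'passkey' in config[key] for key in config.keys()):
--         detected_methods.append('PASSKEY')
--
--     return detected_methods
-- ===== SOURCE B (Python) =====
-- PAT_VALUES = ['store', 'manager', 'cache', 'wincred', 'osxkeychain', 'libsecret']
--
--
-- def check_auth_method(config):
--     """Single pass over config.items() maintaining three flags, then assemble."""
--     pat = ssh = passkey = False
--     for key, value in config.items():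
--         if key.startswith('credential.helper'):
--             if any(v in value for v in PAT_VALUES):
--                 pat = True
--             if 'passkey' in value:
--                 passkey = True
--         if key == 'core.sshCommand' or (key.startswith('url.')
--                                         and key.endswith('.insteadOf')
--                                         and 'ssh://' in value):
--             ssh = True
--     out = []
--     if pat:
--         out.append('PAT')
--     if ssh:
--         out.append('SSH')
--     if passkey:
--         out.append('PASSKEY')
--     return out
-- ===== Notes on version B (the rewrite author's own statement) =====
-- stated objective: simpler
-- what changed: Replaces A's three separate scans over the dict (with repeated config[key] lookups) by one pass over config.items() maintaining three boolean flags, assembling the PAT/SSH/PASSKEY result afterwards in the fixed order.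
import Mathlib
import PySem

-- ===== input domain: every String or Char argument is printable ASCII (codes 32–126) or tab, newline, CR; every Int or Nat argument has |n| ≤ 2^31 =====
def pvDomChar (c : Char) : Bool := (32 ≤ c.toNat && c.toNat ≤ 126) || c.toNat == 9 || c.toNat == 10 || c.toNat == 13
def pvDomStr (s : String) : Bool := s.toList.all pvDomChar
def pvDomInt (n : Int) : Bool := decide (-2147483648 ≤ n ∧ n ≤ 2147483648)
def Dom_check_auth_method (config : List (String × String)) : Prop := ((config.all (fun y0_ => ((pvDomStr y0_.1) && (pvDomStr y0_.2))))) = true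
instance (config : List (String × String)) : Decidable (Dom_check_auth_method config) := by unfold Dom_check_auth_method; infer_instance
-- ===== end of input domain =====

-- B replaces A's three separate scans (with per-key dict lookups) by one pass over the
-- items keeping three flags, then assembles the result in the fixed PAT/SSH/PASSKEY order.

-- ===== PORT A =====
-- AUTH_METHODS['PAT']['valid_values']
def pvValids : List String := ["store", "manager", "cache", "wincred", "osxkeychain", "libsecret"]
-- key.startswith('credential.helper')
def qCred (k : String) : Bool := PySem.Str.startswith k "credential.helper"

-- the 'for key in [...]: value = config[key]; if any(...): append('PAT'); break' loop:
-- returns whether 'PAT' was appended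
def patLoopA (d : PySem.Dict String String) : List String → Bool
  | [] => false
  | k :: rest =>
      let value := (d.get? k).getD ""
      if pvValids.any (fun v => PySem.Str.isIn v value) then true else patLoopA d rest

def check_auth_method (config : List (String × String)) : List String :=
  let d : PySem.Dict String String := PySem.Dict.mk config
  let detected : List String := []
  -- Check for PAT configuration
  let detected :=
    if d.keys.any (fun k => qCred k) then
      if patLoopA d (d.keys.filter (fun k => qCred k)) then detected ++ ["PAT"] else detected
    else detected
  -- Check for SSH configuration
  let detected :=
    if d.contains "core.sshCommand" ||
        d.keys.any (fun k => PySem.Str.startswith k "url." && PySem.Str.endswith k ".insteadOf" &&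
          PySem.Str.isIn "ssh://" ((d.get? k).getD "")) then
      detected ++ ["SSH"] else detected
  -- Check for Passkey configuration
  let detected :=
    if d.keys.any (fun k => qCred k && PySem.Str.isIn "passkey" ((d.get? k).getD "")) then
      detected ++ ["PASSKEY"] else detected
  detected

-- ===== PORT B =====
-- the three per-item tests of Source B's single loop
def pPAT (p : String × String) : Bool :=
  qCred p.1 && pvValids.any (fun v => PySem.Str.isIn v p.2)
def pSSH (p : String × String) : Bool :=
  p.1 == "core.sshCommand" ||
    (PySem.Str.startswith p.1 "url." && PySem.Str.endswith p.1 ".insteadOf" &&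
      PySem.Str.isIn "ssh://" p.2)
def pPK (p : String × String) : Bool :=
  qCred p.1 && PySem.Str.isIn "passkey" p.2

def check_auth_method_alt (config : List (String × String)) : List String :=
  let flags := config.foldl
    (fun (f : Bool × Bool × Bool) p => (f.1 || pPAT p, f.2.1 || pSSH p, f.2.2 || pPK p))
    (false, false, false)
  (if flags.1 then ["PAT"] else []) ++ (if flags.2.1 then ["SSH"] else []) ++
    (if flags.2.2 then ["PASSKEY"] else [])

-- ===== PRECONDITION & SPEC =====
-- Pre_ excludes association lists with duplicate keys: they do not represent any Python
-- dict (A's parameter is a dict, whose keys are unique), so the first-match convention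
-- there is accidental.
def Pre_check_auth_method (config : List (String × String)) : Prop :=
  (config.map Prod.fst).Nodup
instance (config : List (String × String)) : Decidable (Pre_check_auth_method config) := by
  unfold Pre_check_auth_method; infer_instance
def pvWitness_check_auth_method : (List (String × String)) :=
  [("credential.helper", "store"), ("core.sshCommand", "ssh x")]

def Spec_check_auth_method (config : List (String × String)) (out : List String) : Prop :=
  out = check_auth_method_alt config
instance (config : List (String × String)) (out : List String) :
    Decidable (Spec_check_auth_method config out) := by
  unfold Spec_check_auth_method; infer_instance

-- ===== CLAIM (what is proved, stated in full; the proofs are below) =====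
def Claim_equal_check_auth_method : Prop := ∀ (config : List (String × String)), Dom_check_auth_method config → Pre_check_auth_method config → Spec_check_auth_method config (check_auth_method config)

-- ===== LEMMAS AND PROOFS =====

theorem foldl_flags (l : List (String × String)) (a b c : Bool) :
    l.foldl (fun (f : Bool × Bool × Bool) p => (f.1 || pPAT p, f.2.1 || pSSH p, f.2.2 || pPK p))
      (a, b, c)
    = (a || l.any pPAT, b || l.any pSSH, c || l.any pPK) := by
  induction l generalizing a b c with
  | nil => simp
  | cons p t ih => simp [ih, Bool.or_assoc]

theorem patLoopA_any (d : PySem.Dict String String) (ks : List String) :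
    patLoopA d ks = ks.any (fun k => pvValids.any (fun v => PySem.Str.isIn v ((d.get? k).getD ""))) := by
  induction ks with
  | nil => rfl
  | cons k t ih =>
    rw [List.any_cons, ← ih, patLoopA]
    cases h : (pvValids.any fun v => PySem.Str.isIn v ((d.get? k).getD "")) <;> simp

theorem get_of_mem (config : List (String × String))
    (h : (config.map Prod.fst).Nodup) {p : String × String} (hp : p ∈ config) :
    (PySem.Dict.mk config).get? p.1 = some p.2 := by
  exact PySem.Dict.get?_of_mem_items (PySem.Dict.mk config)
    (by simpa using hp) (by simpa [PySem.Dict.keys] using h)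

-- ===== VERDICT (by name: the statement is the Claim_ definition above) =====
theorem check_auth_method_spec : Claim_equal_check_auth_method := by
  intro config _ hpre
  show check_auth_method config = check_auth_method_alt config
  have hget : ∀ {p : String × String}, p ∈ config → (PySem.Dict.mk config).get? p.1 = some p.2 :=
    fun hp => get_of_mem config hpre hp
  simp only [check_auth_method, check_auth_method_alt, foldl_flags, Bool.false_or]
  have hkeys : (PySem.Dict.mk config).keys = config.map Prod.fst := by
    simp [PySem.Dict.keys]
  have hPAT : patLoopA (PySem.Dict.mk config)
      ((PySem.Dict.mk config).keys.filter (fun k => qCred k)) = config.any pPAT := by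
    rw [patLoopA_any, Bool.eq_iff_iff]
    simp only [List.any_eq_true, List.mem_filter, hkeys, List.mem_map]
    constructor
    · rintro ⟨k, ⟨⟨p, hp, rfl⟩, hq⟩, hv⟩
      exact ⟨p, hp, by simp_all [pPAT, hget hp]⟩
    · rintro ⟨p, hp, hv⟩
      refine ⟨p.1, ⟨⟨p, hp, rfl⟩, ?_⟩, ?_⟩ <;> simp_all [pPAT, hget hp]
  have hSSH : ((PySem.Dict.mk config).contains "core.sshCommand" ||
      (PySem.Dict.mk config).keys.any (fun k =>
        PySem.Str.startswith k "url." && PySem.Str.endswith k ".insteadOf" &&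
          PySem.Str.isIn "ssh://" (((PySem.Dict.mk config).get? k).getD ""))) = config.any pSSH := by
    rw [Bool.eq_iff_iff]
    simp only [Bool.or_eq_true, List.any_eq_true, List.mem_map,
      PySem.Dict.contains_iff_mem_keys, hkeys]
    constructor
    · rintro (⟨p, hp, hk⟩ | ⟨k, ⟨p, hp, rfl⟩, hu⟩)
      · exact ⟨p, hp, by simp [pSSH, hk]⟩
      · exact ⟨p, hp, by simp_all [pSSH, hget hp]⟩
    · rintro ⟨p, hp, hs⟩
      simp only [pSSH, Bool.or_eq_true, beq_iff_eq] at hs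
      rcases hs with hk | hu
      · exact Or.inl ⟨p, hp, hk⟩
      · exact Or.inr ⟨p.1, ⟨p, hp, rfl⟩, by simp_all [hget hp]⟩
  have hPK : (PySem.Dict.mk config).keys.any (fun k =>
      qCred k && PySem.Str.isIn "passkey" (((PySem.Dict.mk config).get? k).getD "")) = config.any pPK := by
    rw [Bool.eq_iff_iff]
    simp only [List.any_eq_true, hkeys, List.mem_map]
    constructor
    · rintro ⟨k, ⟨p, hp, rfl⟩, hq⟩
      exact ⟨p, hp, by simp_all [pPK, hget hp]⟩
    · rintro ⟨p, hp, hv⟩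
      exact ⟨p.1, ⟨p, hp, rfl⟩, by simp_all [pPK, hget hp]⟩
  have hGuard : config.any pPAT = true →
      ((List.map (fun x => (x : String × String).1) config).any fun k => qCred k) = true := by
    intro h
    rw [List.any_eq_true] at h ⊢
    rcases h with ⟨p, hp, hv⟩
    exact ⟨p.1, List.mem_map.2 ⟨p, hp, rfl⟩, by simp_all [pPAT]⟩
  rw [hPAT, hSSH, hPK]
  by_cases h1 : config.any pPAT = true
  · have hg := hGuard h1
    by_cases h2 : config.any pSSH = true <;> by_cases h3 : config.any pPK = true <;>
      simp [h1, h2, h3, hg]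
  · have h1' : config.any pPAT = false := by simpa using h1
    by_cases h2 : config.any pSSH = true <;> by_cases h3 : config.any pPK = true <;>
      simp [h1', h2, h3]
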